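-- pv_equiv track=rewrite | github.com/DJ1505/job-ats-scrapers | Comeet/comeet_scraper.py | _extract_description_from_details
-- ===== SOURCE A (Python) =====
-- from typing import Dict, List, Optional, Any
--
-- def _extract_description_from_details(details: List[Dict]) -> tuple[str, str]:
--     """Extract description and requirements from details array."""
--     description_html = ""
--     requirements_html = ""
--
--     for detail in details:
--         detail_name = detail.get("name", "")
--         detail_value = detail.get("value", "")
--
--         if detail_name == "Description":
--             description_html = detail_value
--         elif detail_name == "Requirements":
--             requirements_html = detail_value
--
--     return description_html, requirements_html
-- ===== SOURCE B (Python) =====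
-- from typing import Dict, List
--
-- def _extract_description_from_details(details: List[Dict]) -> tuple[str, str]:
--     def last_value(key):
--         # last occurrence in details == first match scanning from the back
--         for d in reversed(details):
--             if d.get("name", "") == key:
--                 return d.get("value", "")
--         return ""
--     return last_value("Description"), last_value("Requirements")
-- ===== Notes on version B (the rewrite author's own statement) =====
-- stated objective: alternative
-- what changed: Instead of one forward stateful pass with two conditional assignments, B searches the list back-to-front per key, returning the first match from the end with early exit (last occurrence wins by construction), so no mutable accumulator state is carried.
import Mathlib
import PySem

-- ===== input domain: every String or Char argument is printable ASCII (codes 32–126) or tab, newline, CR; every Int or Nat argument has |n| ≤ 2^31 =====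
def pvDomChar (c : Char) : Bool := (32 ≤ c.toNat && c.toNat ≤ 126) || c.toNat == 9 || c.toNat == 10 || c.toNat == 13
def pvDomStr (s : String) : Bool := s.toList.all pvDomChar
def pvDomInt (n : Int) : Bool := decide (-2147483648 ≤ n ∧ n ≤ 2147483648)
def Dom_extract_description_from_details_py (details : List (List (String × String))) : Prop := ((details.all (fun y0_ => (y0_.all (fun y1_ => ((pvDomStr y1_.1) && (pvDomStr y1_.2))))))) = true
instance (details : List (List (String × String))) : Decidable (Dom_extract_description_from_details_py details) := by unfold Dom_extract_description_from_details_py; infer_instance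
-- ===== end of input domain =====

-- B replaces A's forward stateful loop by a per-key back-to-front first-match search (alternative decomposition; return value only).


-- ===== PORT A =====
-- loop: for detail in details, set description/requirements on matching name (last wins)
def extract_description_from_details_py (details : List (List (String × String))) : String × String :=
  details.foldl (fun st detail =>
    let detail_name := (PySem.Dict.mk detail).getD "name" ""
    let detail_value := (PySem.Dict.mk detail).getD "value" ""
    if detail_name == "Description" then (detail_value, st.2)
    else if detail_name == "Requirements" then (st.1, detail_value)
    else st) ("", "")

-- ===== PORT B =====
-- last_value(key): scan reversed(details), return value of first dict whose name matches key, else ""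
def pvLastValue (key : String) : List (List (String × String)) → String
  | [] => ""
  | d :: rest =>
    if ((PySem.Dict.mk d).getD "name" "") == key then (PySem.Dict.mk d).getD "value" ""
    else pvLastValue key rest

def extract_description_from_details_py_alt (details : List (List (String × String))) : String × String :=
  (pvLastValue "Description" details.reverse, pvLastValue "Requirements" details.reverse)

-- ===== PRECONDITION & SPEC =====
def Spec_extract_description_from_details_py (details : List (List (String × String))) (out : String × String) : Prop := out = extract_description_from_details_py_alt details
instance (details : List (List (String × String))) (out : String × String) : Decidable (Spec_extract_description_from_details_py details out) := by unfold Spec_extract_description_from_details_py; infer_instance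

-- ===== CLAIM (what is proved, stated in full; the proofs are below) =====
def Claim_equal_extract_description_from_details_py : Prop := ∀ (details : List (List (String × String))), Dom_extract_description_from_details_py details → Spec_extract_description_from_details_py details (extract_description_from_details_py details)

-- ===== LEMMAS AND PROOFS =====

theorem pvLastValue_append (key : String) (xs ys : List (List (String × String))) :
    pvLastValue key (xs ++ ys)
      = match xs.find? (fun d => ((PySem.Dict.mk d).getD "name" "") == key) with
        | some d => (PySem.Dict.mk d).getD "value" ""
        | none => pvLastValue key ys := by
  induction xs with
  | nil => simp
  | cons hd tl ih =>
    by_cases h : ((PySem.Dict.mk hd).getD "name" "") == key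
    · simp [pvLastValue, h, List.find?]
    · have hb : (((PySem.Dict.mk hd).getD "name" "") == key) = false := by
        simpa using h
      simp only [List.cons_append, pvLastValue, hb, if_false, Bool.false_eq_true]
      rw [ih]
      simp [List.find?, hb]

theorem pv_inv (l : List (List (String × String))) (st : String × String) :
    l.foldl (fun st detail =>
      let detail_name := (PySem.Dict.mk detail).getD "name" ""
      let detail_value := (PySem.Dict.mk detail).getD "value" ""
      if detail_name == "Description" then (detail_value, st.2)
      else if detail_name == "Requirements" then (st.1, detail_value)
      else st) st
    = (match l.reverse.find? (fun d => ((PySem.Dict.mk d).getD "name" "") == "Description") with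
       | some d => (PySem.Dict.mk d).getD "value" ""
       | none => st.1,
       match l.reverse.find? (fun d => ((PySem.Dict.mk d).getD "name" "") == "Requirements") with
       | some d => (PySem.Dict.mk d).getD "value" ""
       | none => st.2) := by
  induction l generalizing st with
  | nil => simp
  | cons hd tl ih =>
    simp only [List.foldl_cons, List.reverse_cons, List.find?_append]
    rw [ih]
    by_cases h1 : ((PySem.Dict.mk hd).getD "name" "") == "Description"
    · have h2 : ¬ (((PySem.Dict.mk hd).getD "name" "") == "Requirements") := by
        simp_all
      cases hfD : tl.reverse.find? (fun d => ((PySem.Dict.mk d).getD "name" "") == "Description") <;>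
      cases hfR : tl.reverse.find? (fun d => ((PySem.Dict.mk d).getD "name" "") == "Requirements") <;>
        simp [h1, h2, List.find?]
    · by_cases h2 : ((PySem.Dict.mk hd).getD "name" "") == "Requirements"
      · cases hfD : tl.reverse.find? (fun d => ((PySem.Dict.mk d).getD "name" "") == "Description") <;>
        cases hfR : tl.reverse.find? (fun d => ((PySem.Dict.mk d).getD "name" "") == "Requirements") <;>
          simp [h1, h2, List.find?]
      · cases hfD : tl.reverse.find? (fun d => ((PySem.Dict.mk d).getD "name" "") == "Description") <;>
        cases hfR : tl.reverse.find? (fun d => ((PySem.Dict.mk d).getD "name" "") == "Requirements") <;>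
          simp [h1, h2, List.find?]

theorem pvLastValue_eq_find (key : String) (l : List (List (String × String))) :
    pvLastValue key l
      = match l.find? (fun d => ((PySem.Dict.mk d).getD "name" "") == key) with
        | some d => (PySem.Dict.mk d).getD "value" ""
        | none => "" := by
  have := pvLastValue_append key l []
  simpa using this

-- ===== VERDICT (by name: the statement is the Claim_ definition above) =====
theorem extract_description_from_details_py_spec : Claim_equal_extract_description_from_details_py := by
  intro details _
  unfold Spec_extract_description_from_details_py extract_description_from_details_py extract_description_from_details_py_alt
  rw [pv_inv details ("", ""), pvLastValue_eq_find, pvLastValue_eq_find]
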